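-- pv_equiv track=rewrite | github.com/mrjones2014/CS360-shors-algorithm | ExperimentUtils.py | get_backend_dict
-- ===== SOURCE A (Python) =====
-- def get_backend_dict(backends):
--     dict = {1: "local_qasm_simulator"}
--     i = 2
--     # ensure simulators are at top of list
--     for b in backends:
--         if "simulator" in b:
--             dict[i] = b
--             i += 1
--     for b in backends:
--         if "simulator" not in b:
--             dict[i] = b
--             i += 1
--     return dict
-- ===== SOURCE B (Python) =====
-- def get_backend_dict(backends):
--     ordered = sorted(backends, key=lambda b: "simulator" not in b)
--     d = {1: "local_qasm_simulator"}
--     for i, b in enumerate(ordered, start=2):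
--         d[i] = b
--     return d
-- ===== Notes on version B (the rewrite author's own statement) =====
-- stated objective: idiomatic
-- what changed: Replaces A's two filtering scans with counter bookkeeping by one stable sort on the boolean key 'simulator' not in b followed by a single enumerate(ordered, start=2) fill loop.
import Mathlib
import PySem

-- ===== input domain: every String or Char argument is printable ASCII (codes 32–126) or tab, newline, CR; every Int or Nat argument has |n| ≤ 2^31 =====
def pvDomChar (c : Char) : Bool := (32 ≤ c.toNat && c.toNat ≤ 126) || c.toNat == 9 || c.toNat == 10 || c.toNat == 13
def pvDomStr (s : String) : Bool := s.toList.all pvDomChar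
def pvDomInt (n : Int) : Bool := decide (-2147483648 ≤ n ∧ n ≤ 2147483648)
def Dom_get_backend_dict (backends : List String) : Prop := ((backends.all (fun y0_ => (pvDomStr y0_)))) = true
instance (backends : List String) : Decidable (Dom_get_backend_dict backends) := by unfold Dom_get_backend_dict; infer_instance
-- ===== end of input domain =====

-- B replaces A's two filtering passes by a stable sort on a boolean key plus one enumerate loop (idiomatic; same result).

-- ===== PORT A =====
-- dict = {1: "local_qasm_simulator"}; i = 2; two passes appending numbered entries (simulators first)
def get_backend_dict (backends : List String) : List (Int × String) :=
  let d0 : PySem.Dict Int String := PySem.Dict.insert PySem.Dict.empty 1 "local_qasm_simulator"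
  let s1 := backends.foldl
    (fun (s : PySem.Dict Int String × Int) b =>
      if PySem.Str.isIn "simulator" b then (s.1.insert s.2 b, s.2 + 1) else s) (d0, 2)
  let s2 := backends.foldl
    (fun (s : PySem.Dict Int String × Int) b =>
      if !(PySem.Str.isIn "simulator" b) then (s.1.insert s.2 b, s.2 + 1) else s) s1
  s2.1.items

-- ===== PORT B =====
-- ordered = sorted(backends, key=lambda b: "simulator" not in b); the bool key False/True is ported as Int 0/1
def get_backend_dict_alt (backends : List String) : List (Int × String) :=
  let ordered := PySem.List.sorted backends
    (fun b => if PySem.Str.isIn "simulator" b then (0 : Int) else 1) false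
  let d0 : PySem.Dict Int String := PySem.Dict.insert PySem.Dict.empty 1 "local_qasm_simulator"
  ((PySem.List.enumerate ordered 2).foldl (fun d p => d.insert p.1 p.2) d0).items

-- ===== PRECONDITION & SPEC =====
def Spec_get_backend_dict (backends : List String) (out : List (Int × String)) : Prop := out = get_backend_dict_alt backends
instance (backends : List String) (out : List (Int × String)) : Decidable (Spec_get_backend_dict backends out) := by unfold Spec_get_backend_dict; infer_instance

-- ===== CLAIM (what is proved, stated in full; the proofs are below) =====
def Claim_equal_get_backend_dict : Prop := ∀ (backends : List String), Dom_get_backend_dict backends → Spec_get_backend_dict backends (get_backend_dict backends)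

-- ===== LEMMAS AND PROOFS =====

-- the sort key used by B
def pvKey (b : String) : Int := if PySem.Str.isIn "simulator" b then 0 else 1

-- A's conditional counting loop is the plain counting loop over the filtered list
theorem pv_foldl_filter (p : String → Bool) (xs : List String)
    (s : PySem.Dict Int String × Int) :
    xs.foldl (fun s b => if p b then (s.1.insert s.2 b, s.2 + 1) else s) s
      = (xs.filter p).foldl (fun s b => (s.1.insert s.2 b, s.2 + 1)) s := by
  induction xs generalizing s with
  | nil => rfl
  | cons x xs ih =>
      by_cases h : p x = true
      · simp [h, ih]
      · simp only [Bool.not_eq_true] at h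
        simp [h, ih]

-- the counting loop is the enumerate loop
theorem pv_foldl_enumerate (L : List String) (d : PySem.Dict Int String) (i : Int) :
    L.foldl (fun (s : PySem.Dict Int String × Int) b => (s.1.insert s.2 b, s.2 + 1)) (d, i)
      = ((PySem.List.enumerate L i).foldl (fun d p => d.insert p.1 p.2) d, i + L.length) := by
  induction L generalizing d i with
  | nil => simp [PySem.List.enumerate]
  | cons x xs ih =>
      simp only [List.foldl_cons, PySem.List.enumerate_cons, ih, List.length_cons]
      refine congrArg _ ?_
      push_cast
      omega

-- inserting an element before everything that strictly exceeds its key, through a prefix it does not precede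
theorem pv_insertBy_mid (x : String) (A B : List String)
    (hA : ∀ a ∈ A, ¬ pvKey x < pvKey a) (hB : ∀ b ∈ B, pvKey x < pvKey b) :
    PySem.List.insertBy (fun a b => decide (pvKey a < pvKey b)) x (A ++ B) = A ++ x :: B := by
  induction A with
  | nil =>
      cases B with
      | nil => simp [PySem.List.insertBy]
      | cons b bs =>
          have hb : pvKey x < pvKey b := hB b (by simp)
          simp [PySem.List.insertBy, hb]
  | cons a as ih =>
      have ha : ¬ pvKey x < pvKey a := hA a (by simp)
      have ih' := ih (fun a' ha' => hA a' (by simp [ha']))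
      simp [PySem.List.insertBy, ha, ih']

-- the stable insertion sort on the 0/1 key partitions: simulators (in order) then the rest (in order)
theorem pv_sorted_partition_aux (xs A B : List String)
    (hA : ∀ a ∈ A, pvKey a = 0) (hB : ∀ b ∈ B, pvKey b = 1) :
    xs.foldl (fun acc x => PySem.List.insertBy (fun a b => decide (pvKey a < pvKey b)) x acc) (A ++ B)
      = (A ++ xs.filter (fun b => PySem.Str.isIn "simulator" b))
        ++ (B ++ xs.filter (fun b => !(PySem.Str.isIn "simulator" b))) := by
  induction xs generalizing A B with
  | nil => simp
  | cons x xs ih =>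
      by_cases hx : PySem.Str.isIn "simulator" x = true
      · have hkx : pvKey x = 0 := by unfold pvKey; rw [hx]; simp
        have hstep : PySem.List.insertBy (fun a b => decide (pvKey a < pvKey b)) x (A ++ B)
            = (A ++ [x]) ++ B := by
          rw [pv_insertBy_mid x A B
            (fun a ha => by rw [hkx, hA a ha]; omega)
            (fun b hb => by rw [hkx, hB b hb]; omega)]
          simp
        have hA' : ∀ a ∈ A ++ [x], pvKey a = 0 := by
          intro a ha
          rcases List.mem_append.mp ha with h | h
          · exact hA a h
          · simp at h; subst h; exact hkx
        rw [List.foldl_cons, hstep, ih (A ++ [x]) B hA' hB]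
        simp only [List.filter_cons, hx, Bool.not_true]
        simp
      · simp only [Bool.not_eq_true] at hx
        have hkx : pvKey x = 1 := by unfold pvKey; rw [hx]; simp
        have hstep : PySem.List.insertBy (fun a b => decide (pvKey a < pvKey b)) x (A ++ B)
            = A ++ (B ++ [x]) := by
          rw [PySem.List.insertBy_of_forall_not_before]
          · simp
          · intro y hy
            rcases List.mem_append.mp hy with h | h
            · rw [decide_eq_false_iff_not, hkx, hA y h]; omega
            · rw [decide_eq_false_iff_not, hkx, hB y h]; omega
        have hB' : ∀ b ∈ B ++ [x], pvKey b = 1 := by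
          intro b hb
          rcases List.mem_append.mp hb with h | h
          · exact hB b h
          · simp at h; subst h; exact hkx
        rw [List.foldl_cons, hstep, ih A (B ++ [x]) hA hB']
        simp only [List.filter_cons, hx, Bool.not_false]
        simp

theorem pv_sorted_partition (xs : List String) :
    PySem.List.sorted xs (fun b => if PySem.Str.isIn "simulator" b then (0 : Int) else 1) false
      = xs.filter (fun b => PySem.Str.isIn "simulator" b)
        ++ xs.filter (fun b => !(PySem.Str.isIn "simulator" b)) := by
  rw [show (fun b : String => if PySem.Str.isIn "simulator" b then (0 : Int) else 1) = pvKey from rfl,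
    PySem.List.sorted_eq_foldl_insertBy]
  simpa using pv_sorted_partition_aux xs [] [] (by simp) (by simp)

-- ===== VERDICT (by name: the statement is the Claim_ definition above) =====
theorem get_backend_dict_spec : Claim_equal_get_backend_dict := by
  intro backends _
  show _ = _
  unfold get_backend_dict get_backend_dict_alt
  rw [pv_sorted_partition]
  simp only [pv_foldl_filter, pv_foldl_enumerate, PySem.List.enumerate_append, List.foldl_append]
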